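-- pv_equiv track=rewrite | github.com/Aasthaengg/IBMdataset | Python_codes/p02917/s186411695.py | solve
-- ===== SOURCE A (Python) =====
-- def solve(acc, xs):
--     head, *tail = xs
--     if not acc:
--         acc.append(head)
--     if not tail:
--         acc.append(head)
--         return acc
--
--     peek, *_ = tail
--     acc.append(min(head, peek))
--     return solve(acc, tail)
-- ===== SOURCE B (Python) =====
-- def solve(acc, xs):
--     n = len(xs)
--     if not acc:
--         acc.append(xs[0])          # empty xs raises IndexError here
--     acc.extend(min(xs[i - 1], xs[i]) for i in range(1, n))
--     acc.append(xs[-1])             # empty xs raises IndexError here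
--     return acc
-- ===== Notes on version B (the rewrite author's own statement) =====
-- stated objective: faster
-- what changed: Replaces A's tail recursion (one call per element, copying the remaining tail via star-unpacking at every step) by a single index-based pass: extend acc with min(xs[i-1], xs[i]) for i in range(1, len(xs)), then append xs[-1].
import Mathlib
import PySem

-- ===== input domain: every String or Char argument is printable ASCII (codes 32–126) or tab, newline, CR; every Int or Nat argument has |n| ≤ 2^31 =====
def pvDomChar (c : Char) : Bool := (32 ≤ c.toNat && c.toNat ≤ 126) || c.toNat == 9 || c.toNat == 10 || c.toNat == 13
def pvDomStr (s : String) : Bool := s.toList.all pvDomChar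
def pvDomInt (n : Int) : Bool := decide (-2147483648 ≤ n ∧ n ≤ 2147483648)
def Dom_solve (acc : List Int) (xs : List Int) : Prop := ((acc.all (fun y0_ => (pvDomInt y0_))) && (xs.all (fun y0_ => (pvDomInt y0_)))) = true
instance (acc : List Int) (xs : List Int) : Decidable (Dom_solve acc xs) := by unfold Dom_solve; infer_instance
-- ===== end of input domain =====

-- B replaces A's tail recursion by one index-based pass over range(1, len(xs));
-- both A and B mutate acc in place by appending — the equivalence proved here is about the return value.

-- ===== PORT A =====
-- A: head,*tail = xs; if not acc: append head; if not tail: append head, return; else append min(head,peek); recurse on tail.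
def solve (acc : List Int) (xs : List Int) : List Int :=
  match xs with
  | [] => acc  -- Python raises ValueError here; excluded by Pre_solve
  | head :: tail =>
    let acc1 := if acc.isEmpty then acc ++ [head] else acc
    match tail with
    | [] => acc1 ++ [head]
    | peek :: _ => solve (acc1 ++ [min head peek]) tail

-- ===== PORT B =====
-- B: n = len(xs); if not acc: append xs[0]; extend with min(xs[i-1], xs[i]) for i in range(1, n); append xs[-1].
-- pyGetD with default 0 is exact here: Pre_solve gives xs ≠ [], so every index is in range.
def solve_alt (acc : List Int) (xs : List Int) : List Int :=
  let n : Int := xs.length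
  let acc1 := if acc.isEmpty then acc ++ [PySem.List.pyGetD xs 0 0] else acc
  let acc2 := acc1 ++ (PySem.List.pyRange 1 n 1).map
      (fun i => min (PySem.List.pyGetD xs (i - 1) 0) (PySem.List.pyGetD xs i 0))
  acc2 ++ [PySem.List.pyGetD xs (-1) 0]

-- ===== PRECONDITION & SPEC =====
-- Pre_ excludes only xs = [], where A raises ValueError (unpacking) and B raises IndexError (xs[0] / xs[-1]).
def Pre_solve (acc : List Int) (xs : List Int) : Prop := xs ≠ []
instance (acc : List Int) (xs : List Int) : Decidable (Pre_solve acc xs) := by unfold Pre_solve; infer_instance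
def pvWitness_solve : List Int × List Int := ([], [3, 1, 2])

def Spec_solve (acc : List Int) (xs : List Int) (out : List Int) : Prop := out = solve_alt acc xs
instance (acc : List Int) (xs : List Int) (out : List Int) : Decidable (Spec_solve acc xs out) := by unfold Spec_solve; infer_instance

-- ===== CLAIM (what is proved, stated in full; the proofs are below) =====
def Claim_equal_solve : Prop := ∀ (acc : List Int) (xs : List Int), Dom_solve acc xs → Pre_solve acc xs → Spec_solve acc xs (solve acc xs)

-- ===== LEMMAS AND PROOFS =====

/-- what A appends after the (possibly extended) acc: adjacent mins, then a doubled last element. -/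
def pvMins : List Int → List Int
  | [] => []
  | [x] => [x]
  | x :: y :: t => min x y :: pvMins (y :: t)

theorem solve_nonempty : ∀ (xs : List Int), xs ≠ [] → ∀ acc : List Int, acc ≠ [] →
    solve acc xs = acc ++ pvMins xs := by
  intro xs
  induction xs with
  | nil => intro h; exact absurd rfl h
  | cons h t ih =>
    intro _ acc ha
    cases t with
    | nil => simp [solve, pvMins, List.isEmpty_iff, ha]
    | cons p t' =>
      have : solve acc (h :: p :: t') = solve (acc ++ [min h p]) (p :: t') := by
        simp [solve, List.isEmpty_iff, ha]
      rw [this, ih (by simp) _ (by simp)]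
      simp [pvMins]

theorem solve_step (acc : List Int) (h : Int) (t : List Int) :
    solve acc (h :: t) = (if acc.isEmpty then acc ++ [h] else acc) ++ pvMins (h :: t) := by
  cases t with
  | nil =>
    cases acc <;> simp [solve, pvMins]
  | cons p t' =>
    have : solve acc (h :: p :: t') =
        solve ((if acc.isEmpty then acc ++ [h] else acc) ++ [min h p]) (p :: t') := by
      cases acc <;> simp [solve]
    rw [this, solve_nonempty (p :: t') (by simp) _ (by simp)]
    simp [pvMins]

/-- nat-indexed adjacent mins, matching B's comprehension after shifting the range. -/
theorem mins_eq_range : ∀ (x : Int) (t : List Int),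
    pvMins (x :: t) =
      (List.range t.length).map (fun k => min ((x :: t).getD k 0) ((x :: t).getD (k + 1) 0))
        ++ [(x :: t).getLast!] := by
  intro x t
  induction t generalizing x with
  | nil => simp [pvMins, List.getLast!]
  | cons y t' ih =>
    have : pvMins (x :: y :: t') = min x y :: pvMins (y :: t') := rfl
    rw [this, ih y]
    rw [List.length_cons, List.range_succ_eq_map]
    simp [List.map_map, Function.comp, List.getLast!]

theorem pyrange_map_eq (xs : List Int) :
    (PySem.List.pyRange 1 (xs.length : Int) 1).map
        (fun i => min (PySem.List.pyGetD xs (i - 1) 0) (PySem.List.pyGetD xs i 0))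
      = (List.range (xs.length - 1)).map (fun k => min (xs.getD k 0) (xs.getD (k + 1) 0)) := by
  rw [PySem.List.pyRange_one]
  rw [List.map_map]
  have hlen : ((xs.length : Int) - 1).toNat = xs.length - 1 := by omega
  rw [hlen]
  apply List.map_congr_left
  intro k _
  simp only [Function.comp]
  have h1 : (1 : Int) + k - 1 = (k : Int) := by ring
  have h2 : (1 : Int) + k = ((k + 1 : Nat) : Int) := by push_cast; ring
  rw [h1, h2, PySem.List.pyGetD_natCast, PySem.List.pyGetD_natCast]

theorem alt_unfold (acc : List Int) (xs : List Int) :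
    solve_alt acc xs =
      (if acc.isEmpty then acc ++ [PySem.List.pyGetD xs 0 0] else acc)
        ++ (PySem.List.pyRange 1 (xs.length : Int) 1).map
            (fun i => min (PySem.List.pyGetD xs (i - 1) 0) (PySem.List.pyGetD xs i 0))
        ++ [PySem.List.pyGetD xs (-1) 0] := rfl

-- ===== VERDICT (by name: the statement is the Claim_ definition above) =====
theorem solve_spec : Claim_equal_solve := by
  intro acc xs _ hpre
  unfold Spec_solve
  cases xs with
  | nil => exact absurd rfl hpre
  | cons h t =>
    rw [solve_step, alt_unfold]
    rw [pyrange_map_eq, PySem.List.pyGetD_neg_one _ _ (by simp)]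
    rw [mins_eq_range]
    have : (h :: t).getLast! = (h :: t).getLast (by simp) := by
      simp [List.getLast!]
    rw [this]
    simp [List.append_assoc, PySem.List.pyGetD]
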